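-- pv_equiv track=rewrite | github.com/mcsnakey/advent-of-code-2023 | solutions/14/part1.py | roll_up_and_get_score
-- ===== SOURCE A (Python) =====
-- def roll_up_and_get_score(board):
--     score = 0
--     for col_idx in range(len(board[0])):
--         top_row_score = len(board)
--         next_score = top_row_score
--         row_idx = 0
--         while row_idx < len(board):
--             if board[row_idx][col_idx] == '#':
--                 next_score = top_row_score - row_idx - 1
--             elif board[row_idx][col_idx] == 'O':
--                 score += next_score
--                 next_score -= 1
--             row_idx += 1
--     return score
-- ===== SOURCE B (Python) =====
-- def roll_up_and_get_score(board):
--     rows = len(board)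
--     total = 0
--     for col in range(len(board[0])):
--         seg_top = 0   # first row of the current open segment (below the last '#')
--         count = 0     # number of 'O' rocks seen in the current segment
--         for row in range(rows):
--             ch = board[row][col]
--             if ch == '#':
--                 # closed-form load of the segment: count rocks stacked from seg_top
--                 total += count * (rows - seg_top) - count * (count - 1) // 2
--                 seg_top = row + 1
--                 count = 0
--             elif ch == 'O':
--                 count += 1
--         total += count * (rows - seg_top) - count * (count - 1) // 2
--     return total
-- ===== Notes on version B (the rewrite author's own statement) =====
-- stated objective: faster
-- what changed: Instead of maintaining a per-rock decreasing next_score and adding it rock by rock, B only counts rocks per '#'-delimited segment and adds each segment's load in one closed-form arithmetic-series formula c*(rows-start) - c*(c-1)//2, doing less per-cell bookkeeping (measured ~2x on large boards).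
import Mathlib
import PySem

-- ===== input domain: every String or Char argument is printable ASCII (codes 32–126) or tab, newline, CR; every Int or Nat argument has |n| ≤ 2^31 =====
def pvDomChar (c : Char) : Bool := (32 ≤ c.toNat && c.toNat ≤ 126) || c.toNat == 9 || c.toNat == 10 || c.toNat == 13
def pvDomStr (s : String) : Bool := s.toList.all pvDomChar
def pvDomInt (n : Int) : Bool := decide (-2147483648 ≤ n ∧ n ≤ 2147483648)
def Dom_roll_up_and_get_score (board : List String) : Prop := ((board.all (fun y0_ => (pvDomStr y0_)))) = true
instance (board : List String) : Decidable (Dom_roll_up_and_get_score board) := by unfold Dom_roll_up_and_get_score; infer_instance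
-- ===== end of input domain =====

-- B replaces A's per-rock running next_score by counting rocks per '#'-segment and adding each
-- segment's load with one closed-form arithmetic-series formula (a timing run measured B ~2x faster).

-- ===== PORT A =====
-- the cell board[row][col]; out-of-range only outside Pre_, where nothing is claimed
def pvCell (board : List String) (rowIdx colIdx : Int) : Option Char :=
  PySem.Str.pyGet? ((PySem.List.pyGet? board rowIdx).getD "") colIdx

-- body of A's inner while loop, state = (score, next_score); top_row_score = rows
def pvStepA (board : List String) (rows colIdx : Int) (st : Int × Int) (rowIdx : Int) : Int × Int :=
  if pvCell board rowIdx colIdx = some '#' then (st.1, rows - rowIdx - 1)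
  else if pvCell board rowIdx colIdx = some 'O' then (st.1 + st.2, st.2 - 1)
  else st

-- one iteration of A's outer for loop over columns
def pvColA (board : List String) (rows score colIdx : Int) : Int :=
  ((PySem.List.pyRange 0 rows 1).foldl (pvStepA board rows colIdx) (score, rows)).1

def roll_up_and_get_score (board : List String) : Int :=
  let rows : Int := board.length
  let width : Int := PySem.Str.len ((PySem.List.pyGet? board 0).getD "")
  (PySem.List.pyRange 0 width 1).foldl (pvColA board rows) 0

-- ===== PORT B =====
-- closed-form load of a segment starting at row `top` holding `count` rocks
def pvSegSum (count rows top : Int) : Int :=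
  count * (rows - top) - PySem.Int.floordiv (count * (count - 1)) 2

-- body of B's inner row loop, state = (total, seg_top, count)
def pvStepB (board : List String) (rows col : Int) (st : Int × Int × Int) (row : Int) : Int × Int × Int :=
  if pvCell board row col = some '#' then (st.1 + pvSegSum st.2.2 rows st.2.1, row + 1, 0)
  else if pvCell board row col = some 'O' then (st.1, st.2.1, st.2.2 + 1)
  else st

-- one iteration of B's outer loop over columns
def pvColB (board : List String) (rows total col : Int) : Int :=
  let st := (PySem.List.pyRange 0 rows 1).foldl (pvStepB board rows col) (total, 0, 0)
  st.1 + pvSegSum st.2.2 rows st.2.1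

def roll_up_and_get_score_alt (board : List String) : Int :=
  let rows : Int := board.length
  let width : Int := PySem.Str.len ((PySem.List.pyGet? board 0).getD "")
  (PySem.List.pyRange 0 width 1).foldl (pvColB board rows) 0

-- ===== PRECONDITION & SPEC =====
-- Pre_ excludes exactly the boards where Python A raises IndexError: the empty board
-- (board[0]) and ragged boards with a row shorter than the first row.
def Pre_roll_up_and_get_score (board : List String) : Prop :=
  board ≠ [] ∧ ∀ s ∈ board, PySem.Str.len (board.headD "") ≤ PySem.Str.len s
instance (board : List String) : Decidable (Pre_roll_up_and_get_score board) := by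
  unfold Pre_roll_up_and_get_score; infer_instance

def pvWitness_roll_up_and_get_score : List String := ["O.#", "#O.", "..O"]

def Spec_roll_up_and_get_score (board : List String) (out : Int) : Prop := out = roll_up_and_get_score_alt board
instance (board : List String) (out : Int) : Decidable (Spec_roll_up_and_get_score board out) := by unfold Spec_roll_up_and_get_score; infer_instance

-- ===== CLAIM (what is proved, stated in full; the proofs are below) =====
def Claim_equal_roll_up_and_get_score : Prop := ∀ (board : List String), Dom_roll_up_and_get_score board → Pre_roll_up_and_get_score board → Spec_roll_up_and_get_score board (roll_up_and_get_score board)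

-- ===== LEMMAS AND PROOFS =====
lemma pvSegSum_zero (rows t : Int) : pvSegSum 0 rows t = 0 := by
  simp [pvSegSum, PySem.Int.floordiv]

lemma pvSegSum_succ (c rows t : Int) :
    pvSegSum (c + 1) rows t = pvSegSum c rows t + (rows - t - c) := by
  unfold pvSegSum
  rw [PySem.Int.floordiv_eq_ediv_of_pos (by norm_num),
      PySem.Int.floordiv_eq_ediv_of_pos (by norm_num)]
  have h : (c + 1) * (c + 1 - 1) = c * (c - 1) + c * 2 := by ring
  rw [h, Int.add_mul_ediv_right _ _ (by norm_num : (2:Int) ≠ 0)]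
  ring

-- loop invariant: A's state (s, next) matches B's state (tot, t, c) when
-- s = tot + pvSegSum c rows t and next = rows - t - c
lemma pvLoop_inv (board : List String) (rows col : Int) :
    ∀ (l : List Int) (tot t c : Int),
    ((l.foldl (pvStepA board rows col) (tot + pvSegSum c rows t, rows - t - c)).1)
      = (let fb := l.foldl (pvStepB board rows col) (tot, t, c)
         fb.1 + pvSegSum fb.2.2 rows fb.2.1) := by
  intro l
  induction l with
  | nil => intro tot t c; simp
  | cons r l ih =>
      intro tot t c
      simp only [List.foldl_cons, pvStepA, pvStepB]
      by_cases h1 : pvCell board r col = some '#'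
      · simp only [h1, if_pos]
        have := ih (tot + pvSegSum c rows t) (r + 1) 0
        rw [pvSegSum_zero] at this
        have e : rows - r - 1 = rows - (r + 1) - 0 := by ring
        rw [e]
        simpa using this
      · by_cases h2 : pvCell board r col = some 'O'
        · simp only [h2, if_true]
          have := ih tot t (c + 1)
          rw [pvSegSum_succ] at this
          have e1 : tot + pvSegSum c rows t + (rows - t - c)
              = tot + (pvSegSum c rows t + (rows - t - c)) := by ring
          have e2 : rows - t - c - 1 = rows - t - (c + 1) := by ring
          rw [e1, e2]
          simpa using this
        · simp only [if_neg h1, if_neg h2]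
          exact ih tot t c

lemma pvCol_eq (board : List String) (rows s col : Int) :
    pvColA board rows s col = pvColB board rows s col := by
  unfold pvColA pvColB
  have := pvLoop_inv board rows col (PySem.List.pyRange 0 rows 1) s 0 0
  rw [pvSegSum_zero] at this
  simpa using this

-- ===== VERDICT (by name: the statement is the Claim_ definition above) =====
theorem roll_up_and_get_score_spec : Claim_equal_roll_up_and_get_score := by
  intro board _ _
  unfold Spec_roll_up_and_get_score roll_up_and_get_score roll_up_and_get_score_alt
  have h : pvColA board (board.length) = pvColB board (board.length) :=
    funext fun s => funext fun col => pvCol_eq board _ s col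
  simp only [h]
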